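-- pv_equiv track=rewrite | github.com/Siyuan-Li201/Lares | code/code/code_compare/extract_eq.py | split_logical_conditions_pseudo
-- ===== SOURCE A (Python) =====
-- def split_logical_conditions_pseudo(condition_str):
--     """将条件字符串按照逻辑运算符（&& 和 ||）分割"""
--     # 首先按照 || 分割
--     or_parts = condition_str.split('|')
--     sub_conditions = []
--
--     # 然后对每个部分按照 && 分割
--     for or_part in or_parts:
--         and_parts = or_part.split('&')
--         for part in and_parts:
--             # 清理空白字符并添加到结果列表
--             cleaned_part = ' '.join(part.split())
--             if cleaned_part:
--                 sub_conditions.append(cleaned_part)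
--
--     return sub_conditions
-- ===== SOURCE B (Python) =====
-- def split_logical_conditions_pseudo(condition_str):
--     """Single character scan: split on '|' and '&' in one pass, then one cleaning pass."""
--     pieces = []
--     cur = []
--     for ch in condition_str:
--         if ch == '|' or ch == '&':
--             pieces.append(''.join(cur))
--             cur = []
--         else:
--             cur.append(ch)
--     pieces.append(''.join(cur))
--     result = []
--     for p in pieces:
--         cleaned = ' '.join(p.split())
--         if cleaned:
--             result.append(cleaned)
--     return result
-- ===== Notes on version B (the rewrite author's own statement) =====
-- stated objective: alternative
-- what changed: A splits on the pipe character and then loops splitting each part on the ampersand (a nested loop over a ragged list-of-lists); B does one flat character scan cutting at either delimiter, then a single cleaning pass over the flat piece list.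
import Mathlib
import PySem

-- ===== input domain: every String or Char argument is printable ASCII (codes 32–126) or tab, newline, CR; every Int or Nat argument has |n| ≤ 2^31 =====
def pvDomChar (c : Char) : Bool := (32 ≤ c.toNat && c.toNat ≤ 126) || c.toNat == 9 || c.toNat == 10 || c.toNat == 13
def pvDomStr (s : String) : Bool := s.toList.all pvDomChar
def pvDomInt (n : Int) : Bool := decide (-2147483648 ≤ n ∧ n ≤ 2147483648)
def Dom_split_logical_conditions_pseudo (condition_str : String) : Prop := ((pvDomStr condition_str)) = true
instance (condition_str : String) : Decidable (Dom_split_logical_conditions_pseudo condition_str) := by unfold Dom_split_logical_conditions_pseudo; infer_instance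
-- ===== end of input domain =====

-- B replaces A's two-level nested split (split on '|', then split each part on '&') by a single
-- character scan producing the flat piece list, followed by one cleaning pass (objective: alternative).

-- ===== PORT A =====
-- ' '.join(part.split()) — shared whitespace normalisation both Pythons perform verbatim
def pvClean (p : List Char) : List Char := PySem.Chars.join [' '] (PySem.Chars.split₀ p)

def split_logical_conditions_pseudo (condition_str : String) : List String :=
  let or_parts := PySem.Chars.splitOn condition_str.toList ['|']
  or_parts.foldl (fun sub_conditions or_part =>
    (PySem.Chars.splitOn or_part ['&']).foldl (fun sc part =>
      let cleaned := pvClean part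
      if cleaned ≠ [] then sc ++ [String.ofList cleaned] else sc) sub_conditions) []

-- ===== PORT B =====
-- Source B's single scan: cut on '|' or '&', accumulating the current piece and the finished pieces
def pvScanB : List Char → List Char → List (List Char) → List (List Char)
  | [], cur, pieces => pieces ++ [cur]
  | ch :: rest, cur, pieces =>
      if ch = '|' ∨ ch = '&' then pvScanB rest [] (pieces ++ [cur])
      else pvScanB rest (cur ++ [ch]) pieces

def split_logical_conditions_pseudo_alt (condition_str : String) : List String :=
  let pieces := pvScanB condition_str.toList [] []
  pieces.foldl (fun result p =>
    let cleaned := pvClean p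
    if cleaned ≠ [] then result ++ [String.ofList cleaned] else result) []

-- ===== PRECONDITION & SPEC =====
def Spec_split_logical_conditions_pseudo (condition_str : String) (out : List String) : Prop := out = split_logical_conditions_pseudo_alt condition_str
instance (condition_str : String) (out : List String) : Decidable (Spec_split_logical_conditions_pseudo condition_str out) := by unfold Spec_split_logical_conditions_pseudo; infer_instance

-- ===== CLAIM (what is proved, stated in full; the proofs are below) =====
def Claim_equal_split_logical_conditions_pseudo : Prop := ∀ (condition_str : String), Dom_split_logical_conditions_pseudo condition_str → Spec_split_logical_conditions_pseudo condition_str (split_logical_conditions_pseudo condition_str)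

-- ===== LEMMAS AND PROOFS =====

-- structural characterisation of splitting on a single character
def pvSplitOne (c : Char) : List Char → List (List Char)
  | [] => [[]]
  | d :: rest =>
      if d = c then [] :: pvSplitOne c rest
      else match pvSplitOne c rest with
           | [] => [[d]]
           | y :: ys => (d :: y) :: ys

def pvMapHead (f : List Char → List Char) : List (List Char) → List (List Char)
  | [] => []
  | y :: ys => f y :: ys

theorem pvSplitOne_ne_nil (c : Char) (l : List Char) : pvSplitOne c l ≠ [] := by
  cases l with
  | nil => simp [pvSplitOne]
  | cons d rest =>
    simp only [pvSplitOne]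
    split
    · simp
    · cases h : pvSplitOne c rest <;> simp

theorem pvSplitOn_go_eq (c : Char) (l : List Char) : ∀ (fuel : Nat) (cur : List Char)
    (acc : List (List Char)), l.length ≤ fuel →
    PySem.Chars.splitOn.go [c] fuel l cur acc
      = acc.reverse ++ pvMapHead (cur.reverse ++ ·) (pvSplitOne c l) := by
  induction l with
  | nil =>
    intro fuel cur acc _
    cases fuel <;> simp [PySem.Chars.splitOn.go, pvSplitOne, pvMapHead]
  | cons d rest ih =>
    intro fuel cur acc hf
    cases fuel with
    | zero => simp at hf
    | succ fuel =>
      by_cases hd : c = d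
      · subst hd
        have : PySem.Chars.splitOn.go [c] (fuel + 1) (c :: rest) cur acc
            = PySem.Chars.splitOn.go [c] fuel rest [] (cur.reverse :: acc) := by
          simp [PySem.Chars.splitOn.go, List.isPrefixOf]
        rw [this, ih fuel [] (cur.reverse :: acc) (by simpa using hf)]
        obtain ⟨y, ys, hy⟩ := List.exists_cons_of_ne_nil (pvSplitOne_ne_nil c rest)
        simp [pvSplitOne, hy, pvMapHead]
      · have hdc : ¬ d = c := fun h => hd h.symm
        have : PySem.Chars.splitOn.go [c] (fuel + 1) (d :: rest) cur acc
            = PySem.Chars.splitOn.go [c] fuel rest (d :: cur) acc := by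
          simp [PySem.Chars.splitOn.go, List.isPrefixOf, hd]
        rw [this, ih fuel (d :: cur) acc (by simpa using hf)]
        obtain ⟨y, ys, hy⟩ := List.exists_cons_of_ne_nil (pvSplitOne_ne_nil c rest)
        simp [pvSplitOne, hy, pvMapHead, hdc]

theorem pvSplitOn_eq (c : Char) (l : List Char) :
    PySem.Chars.splitOn l [c] = pvSplitOne c l := by
  have h := pvSplitOn_go_eq c l (l.length + 1) [] [] (by omega)
  obtain ⟨y, ys, hy⟩ := List.exists_cons_of_ne_nil (pvSplitOne_ne_nil c l)
  simpa [PySem.Chars.splitOn, hy, pvMapHead] using h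

-- the flat piece list both programs compute
def pvPieces (l : List Char) : List (List Char) :=
  (pvSplitOne '|' l).flatMap (pvSplitOne '&')

theorem pvPieces_ne_nil (l : List Char) : pvPieces l ≠ [] := by
  unfold pvPieces
  obtain ⟨y, ys, hy⟩ := List.exists_cons_of_ne_nil (pvSplitOne_ne_nil '|' l)
  obtain ⟨z, zs, hz⟩ := List.exists_cons_of_ne_nil (pvSplitOne_ne_nil '&' y)
  simp [hy, hz]

theorem pvPieces_nil : pvPieces [] = [[]] := by simp [pvPieces, pvSplitOne]

theorem pvPieces_cons_sep (d : Char) (rest : List Char) (hd : d = '|' ∨ d = '&') :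
    pvPieces (d :: rest) = [] :: pvPieces rest := by
  rcases hd with h | h <;> subst h
  · simp [pvPieces, pvSplitOne]
  · unfold pvPieces
    obtain ⟨y, ys, hy⟩ := List.exists_cons_of_ne_nil (pvSplitOne_ne_nil '|' rest)
    simp [pvSplitOne, hy]

theorem pvPieces_cons_other (d : Char) (rest : List Char) (h1 : ¬ d = '|') (h2 : ¬ d = '&') :
    pvPieces (d :: rest) = pvMapHead (d :: ·) (pvPieces rest) := by
  unfold pvPieces
  obtain ⟨y, ys, hy⟩ := List.exists_cons_of_ne_nil (pvSplitOne_ne_nil '|' rest)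
  obtain ⟨z, zs, hz⟩ := List.exists_cons_of_ne_nil (pvSplitOne_ne_nil '&' y)
  simp [pvSplitOne, hy, hz, h1, h2, pvMapHead]

theorem pvScanB_eq (l : List Char) : ∀ (cur : List Char) (pieces : List (List Char)),
    pvScanB l cur pieces = pieces ++ pvMapHead (cur ++ ·) (pvPieces l) := by
  induction l with
  | nil => intro cur pieces; simp [pvScanB, pvPieces_nil, pvMapHead]
  | cons ch rest ih =>
    intro cur pieces
    by_cases h : ch = '|' ∨ ch = '&'
    · rw [pvScanB, if_pos h, ih, pvPieces_cons_sep ch rest h]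
      obtain ⟨y, ys, hy⟩ := List.exists_cons_of_ne_nil (pvPieces_ne_nil rest)
      simp [hy, pvMapHead]
    · push Not at h
      rw [pvScanB, if_neg (by push Not; exact h), ih,
        pvPieces_cons_other ch rest h.1 h.2]
      obtain ⟨y, ys, hy⟩ := List.exists_cons_of_ne_nil (pvPieces_ne_nil rest)
      simp [hy, pvMapHead]

-- ===== VERDICT (by name: the statement is the Claim_ definition above) =====
theorem split_logical_conditions_pseudo_spec : Claim_equal_split_logical_conditions_pseudo := by
  intro condition_str _
  show _ = _
  unfold split_logical_conditions_pseudo split_logical_conditions_pseudo_alt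
  rw [pvScanB_eq]
  obtain ⟨y, ys, hy⟩ := List.exists_cons_of_ne_nil (pvPieces_ne_nil condition_str.toList)
  rw [pvSplitOn_eq]
  simp only [← List.foldl_flatMap]
  have : (pvSplitOne '|' condition_str.toList).flatMap
      (fun or_part => PySem.Chars.splitOn or_part ['&']) = pvPieces condition_str.toList := by
    unfold pvPieces
    exact List.flatMap_congr (fun x _ => pvSplitOn_eq '&' x)
  rw [this, hy]
  simp [pvMapHead]
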